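-- pv_equiv track=rewrite | github.com/lordzizzy/leet_code | 04_daily_challenge/2021/07-july/week1/reduce_arr_size_to_half.py | minSetSize_counter_and_sort
-- ===== SOURCE A (Python) =====
-- from typing import Callable, Counter, List
--
-- def minSetSize_counter_and_sort(arr: List[int]) -> int:
--     res, half = 0, len(arr) // 2
--     c = Counter(arr)
--     for i in sorted(c.values(), reverse=True):
--         half -= i
--         res += 1
--         if half <= 0:
--             break
--     return res
-- ===== SOURCE B (Python) =====
-- def minSetSize_counter_and_sort(arr):
--     n = len(arr)
--     if n == 0:
--         return 0
--     freq = {}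
--     for x in arr:
--         freq[x] = freq.get(x, 0) + 1
--     bucket = [0] * (n + 1)
--     for f in freq.values():
--         bucket[f] += 1
--     # at least one distinct value is always removed (A's loop body runs before its break test)
--     need = max(n // 2, 1)
--     res = 0
--     for f in range(n, 0, -1):
--         k = bucket[f]
--         if k == 0:
--             continue
--         take = min(k, (need + f - 1) // f)
--         res += take
--         need -= take * f
--         if need <= 0:
--             break
--     return res
-- ===== Notes on version B (the rewrite author's own statement) =====
-- stated objective: alternative
-- what changed: Replaces the comparison sort of the Counter's values by a bucket count of frequencies (frequencies are bounded by n) followed by a greedy per-bucket arithmetic accumulation taking min(bucket[f], ceil(need/f)) groups at once instead of one value per iteration; O(n) array passes instead of an O(n log n) sort, though CPython's C-level sorted() makes A faster in wall-clock terms.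
import Mathlib
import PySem

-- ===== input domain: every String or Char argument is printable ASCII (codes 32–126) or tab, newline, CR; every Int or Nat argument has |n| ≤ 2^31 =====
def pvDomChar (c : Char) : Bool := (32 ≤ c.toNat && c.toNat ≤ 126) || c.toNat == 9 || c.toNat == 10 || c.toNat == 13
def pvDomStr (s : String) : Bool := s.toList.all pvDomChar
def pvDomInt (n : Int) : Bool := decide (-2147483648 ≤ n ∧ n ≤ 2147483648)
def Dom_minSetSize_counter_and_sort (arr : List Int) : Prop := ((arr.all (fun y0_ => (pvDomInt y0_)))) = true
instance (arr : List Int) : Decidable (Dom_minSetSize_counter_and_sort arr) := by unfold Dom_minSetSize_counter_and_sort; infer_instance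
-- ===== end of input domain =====

-- B replaces A's comparison sort of the Counter's values by a bucket count of frequencies
-- plus a per-bucket greedy arithmetic step (objective: alternative algorithm, same result).

-- ===== PORT A =====
-- the 'for i in sorted(...)' loop with its break, carrying (res, half)
def pvGoA : List Int → Int → Int → Int
  | [], res, _ => res
  | i :: t, res, half =>
    let half' := half - i
    let res' := res + 1
    if half' ≤ 0 then res' else pvGoA t res' half'

def minSetSize_counter_and_sort (arr : List Int) : Int :=
  let half : Int := PySem.Int.floordiv (arr.length : Int) 2
  let c := PySem.Dict.counter arr
  pvGoA (PySem.List.sorted c.values (fun x => x) true) 0 half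

-- ===== PORT B =====
-- the 'for f in range(n, 0, -1)' loop of Source B with continue/break, carrying (res, need)
def pvGoB (bucket : List Int) : List Int → Int → Int → Int
  | [], res, _ => res
  | f :: t, res, need =>
    let k := PySem.List.pyGetD bucket f 0
    if k = 0 then pvGoB bucket t res need
    else
      let take := min k (PySem.Int.floordiv (need + f - 1) f)
      let res' := res + take
      let need' := need - take * f
      if need' ≤ 0 then res' else pvGoB bucket t res' need'

def minSetSize_counter_and_sort_alt (arr : List Int) : Int :=
  let n := arr.length
  if n = 0 then 0 else
  let freq := arr.foldl (fun d x => d.insert x (d.getD x 0 + 1)) PySem.Dict.empty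
  -- 'bucket[f] += 1': every frequency f satisfies 1 ≤ f ≤ n < len(bucket), so the Python
  -- index is in range; List.set at f.toNat is exact there (f ≥ 1, so toNat is faithful)
  let bucket := freq.values.foldl
    (fun b f => b.set f.toNat (PySem.List.pyGetD b f 0 + 1)) (List.replicate (n + 1) (0 : Int))
  let need := max (PySem.Int.floordiv (n : Int) 2) 1
  pvGoB bucket (PySem.List.pyRange (n : Int) 0 (-1)) 0 need

-- ===== PRECONDITION & SPEC =====
def Spec_minSetSize_counter_and_sort (arr : List Int) (out : Int) : Prop := out = minSetSize_counter_and_sort_alt arr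
instance (arr : List Int) (out : Int) : Decidable (Spec_minSetSize_counter_and_sort arr out) := by unfold Spec_minSetSize_counter_and_sort; infer_instance

-- ===== CLAIM (what is proved, stated in full; the proofs are below) =====
def Claim_equal_minSetSize_counter_and_sort : Prop := ∀ (arr : List Int), Dom_minSetSize_counter_and_sort arr → Spec_minSetSize_counter_and_sort arr (minSetSize_counter_and_sort arr)

-- ===== LEMMAS AND PROOFS =====

-- the common greedy spec: number of values taken from l (one per step) until the budget t is exhausted
def pvS : List Int → Int → Int
  | [], _ => 0
  | i :: r, t => if t - i ≤ 0 then 1 else 1 + pvS r (t - i)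

theorem pvGoA_eq_S (l : List Int) : ∀ res half, pvGoA l res half = res + pvS l half := by
  induction l with
  | nil => intro res half; simp [pvGoA, pvS]
  | cons i t ih =>
    intro res half
    simp only [pvGoA, pvS]
    by_cases h : half - i ≤ 0
    · simp [h]
    · simp [h, ih]; ring

theorem pvS_one (l : List Int) (t : Int) (hl : l ≠ []) (hpos : ∀ v ∈ l, 1 ≤ v) (ht : t ≤ 1) :
    pvS l t = 1 := by
  cases l with
  | nil => exact absurd rfl hl
  | cons i r =>
    have : 1 ≤ i := hpos i (by simp)
    simp [pvS, show t - i ≤ 0 by omega]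

-- ceil division via (need + f - 1) // f: brackets
theorem pvCeil_brackets (need f : Int) (hf : 1 ≤ f) (hn : 1 ≤ need) :
    let c := PySem.Int.floordiv (need + f - 1) f
    need ≤ c * f ∧ (c - 1) * f < need ∧ 1 ≤ c := by
  intro c
  have h := (PySem.Int.floordiv_eq_iff_of_pos (a := need + f - 1) (b := f) (q := c) (by omega)).mp rfl
  obtain ⟨h1, h2⟩ := h
  have hle : need ≤ c * f := by nlinarith
  have hlt : (c - 1) * f < need := by nlinarith
  refine ⟨hle, hlt, ?_⟩
  nlinarith

theorem pvS_replicate (f : Int) (hf : 1 ≤ f) :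
    ∀ (k : Nat) (need : Int), 1 ≤ need → ∀ rest,
    pvS (List.replicate k f ++ rest) need =
      (if PySem.Int.floordiv (need + f - 1) f ≤ (k : Int)
       then PySem.Int.floordiv (need + f - 1) f
       else (k : Int) + pvS rest (need - k * f)) := by
  intro k
  induction k with
  | zero =>
    intro need hn rest
    obtain ⟨_, _, hc1⟩ := pvCeil_brackets need f hf hn
    simp only [List.replicate_zero, List.nil_append, Nat.cast_zero]
    rw [if_neg (by omega)]
    norm_num
  | succ k ih =>
    intro need hn rest
    obtain ⟨hle, hlt, hc1⟩ := pvCeil_brackets need f hf hn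
    set c := PySem.Int.floordiv (need + f - 1) f with hc
    simp only [List.replicate_succ, List.cons_append, pvS]
    by_cases hstop : need - f ≤ 0
    · -- one step finishes: c = 1
      have hceq : c = 1 := by
        rw [hc]
        rw [PySem.Int.floordiv_eq_iff_of_pos (by omega)]
        constructor <;> nlinarith
      rw [if_pos hstop, hceq, if_pos (by push_cast; omega)]
    · rw [if_neg hstop]
      have hn' : 1 ≤ need - f := by omega
      rw [ih (need - f) hn' rest]
      -- ceil (need - f) f = c - 1
      have hceq : PySem.Int.floordiv (need - f + f - 1) f = c - 1 := by
        rw [PySem.Int.floordiv_eq_iff_of_pos (by omega)]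
        constructor <;> nlinarith
      rw [hceq]
      by_cases hck : c - 1 ≤ (k : Int)
      · rw [if_pos hck, if_pos (by push_cast; omega)]; omega
      · rw [if_neg hck, if_neg (by push_cast; omega)]
        push_cast
        rw [show need - f - (k : Int) * f = need - (1 + (k : Int)) * f by ring]
        ring

theorem pvGoB_eq_S (bucket : List Int) (cnt : Int → Nat) :
    ∀ (fs : List Int), (∀ f ∈ fs, 1 ≤ f ∧ PySem.List.pyGetD bucket f 0 = (cnt f : Int)) →
    ∀ res need, 1 ≤ need →
    pvGoB bucket fs res need = res + pvS (fs.flatMap (fun f => List.replicate (cnt f) f)) need := by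
  intro fs
  induction fs with
  | nil => intro _ res need _; simp [pvGoB, pvS]
  | cons f t ih =>
    intro hfs res need hn
    obtain ⟨hf1, hcnt⟩ := hfs f (by simp)
    have ht : ∀ g ∈ t, 1 ≤ g ∧ PySem.List.pyGetD bucket g 0 = (cnt g : Int) := fun g hg => hfs g (by simp [hg])
    simp only [pvGoB, List.flatMap_cons]
    rw [hcnt]
    obtain ⟨hle, hlt, hc1⟩ := pvCeil_brackets need f hf1 hn
    set c := PySem.Int.floordiv (need + f - 1) f with hc
    by_cases hk0 : (cnt f : Int) = 0
    · rw [if_pos hk0, ih ht res need hn]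
      have : cnt f = 0 := by omega
      simp [this]
    · rw [if_neg hk0]
      rw [pvS_replicate f hf1 (cnt f) need hn]
      by_cases hck : c ≤ (cnt f : Int)
      · -- finish inside this bucket
        rw [if_pos hck]
        have htake : min ((cnt f : Int)) c = c := by omega
        rw [htake, if_pos (by nlinarith)]
      · rw [if_neg hck]
        have htake : min ((cnt f : Int)) c = (cnt f : Int) := by omega
        rw [htake]
        have hneed' : 1 ≤ need - (cnt f : Int) * f := by nlinarith
        rw [if_neg (by omega), ih ht _ _ hneed']
        ring

-- bucket lookup = count of f among the values
theorem pvBucket_get (n : Nat) (l : List Int) (hl : ∀ v ∈ l, 1 ≤ v ∧ v ≤ (n : Int)) :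
    ∀ (b : List Int), b.length = n + 1 →
    ∀ f : Int, 0 ≤ f → f < (n : Int) + 1 →
    PySem.List.pyGetD (l.foldl (fun b f => b.set f.toNat (PySem.List.pyGetD b f 0 + 1)) b) f 0
      = PySem.List.pyGetD b f 0 + (l.count f : Int) := by
  induction l with
  | nil => intro b _ f _ _; simp
  | cons x t ih =>
    intro b hb f hf0 hfn
    obtain ⟨hx1, hxn⟩ := hl x (by simp)
    have ht : ∀ v ∈ t, 1 ≤ v ∧ v ≤ (n : Int) := fun v hv => hl v (by simp [hv])
    simp only [List.foldl_cons]
    rw [ih ht _ (by simp [hb]) f hf0 hfn]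
    have hget : ∀ g : Int, 0 ≤ g → g < (n : Int) + 1 →
        PySem.List.pyGetD (b.set x.toNat (PySem.List.pyGetD b x 0 + 1)) g 0
          = if g = x then PySem.List.pyGetD b x 0 + 1 else PySem.List.pyGetD b g 0 := by
      intro g hg0 hgn
      have hlen : (b.set x.toNat (PySem.List.pyGetD b x 0 + 1)).length = n + 1 := by
        simp [hb]
      rw [PySem.List.pyGetD_eq_getElem _ 0 hg0 (by rw [hlen]; omega)]
      rw [List.getElem_set]
      by_cases hgx : g = x
      · rw [if_pos hgx, if_pos (by omega)]
      · rw [if_neg hgx, if_neg (by omega), PySem.List.pyGetD_eq_getElem _ 0 hg0 (by rw [hb]; omega)]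
    rw [hget f hf0 hfn]
    by_cases hfx : f = x
    · subst hfx; simp; ring
    · rw [if_neg hfx]
      have hxf : ¬ x = f := fun h => hfx h.symm
      simp [hxf]

-- the bucket expansion is a permutation of the values list
theorem pvCount_flatMap (cnt : Int → Nat) :
    ∀ (fs : List Int), fs.Nodup →
    ∀ g : Int, (fs.flatMap (fun f => List.replicate (cnt f) f)).count g
      = if g ∈ fs then cnt g else 0 := by
  intro fs
  induction fs with
  | nil => intro _ g; simp
  | cons f t ih =>
    intro hnd g
    have hnd' : t.Nodup := hnd.of_cons
    simp only [List.flatMap_cons, List.count_append, List.count_replicate, ih hnd' g]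
    by_cases hgf : g = f
    · subst hgf
      have : g ∉ t := by simpa using (List.nodup_cons.mp hnd).1
      simp [this]
    · have hfg : ¬ f = g := fun h => hgf h.symm
      simp [hgf, hfg, List.mem_cons]

theorem pvPairwise_flatMap (cnt : Int → Nat) :
    ∀ (fs : List Int), fs.Pairwise (fun a b => b < a) →
    (fs.flatMap (fun f => List.replicate (cnt f) f)).Pairwise (fun a b => b ≤ a) := by
  intro fs
  induction fs with
  | nil => intro _; simp
  | cons f t ih =>
    intro hp
    rw [List.pairwise_cons] at hp
    simp only [List.flatMap_cons]
    rw [List.pairwise_append]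
    refine ⟨List.pairwise_replicate.mpr (Or.inr (le_refl f)) , ih hp.2, ?_⟩
    · intro a ha b hb
      have haf : a = f := List.eq_of_mem_replicate ha
      have : ∃ g ∈ t, b ∈ List.replicate (cnt g) g := by
        simpa using List.mem_flatMap.mp hb
      obtain ⟨g, hg, hbg⟩ := this
      have hbg' : b = g := List.eq_of_mem_replicate hbg
      subst haf; subst hbg'
      exact le_of_lt (hp.1 b hg)

-- assembly helpers
theorem pvVs_eq (arr : List Int) :
    (PySem.Dict.counter arr).values
      = (PySem.Set.ofList arr).map (fun k => (arr.count k : Int)) := by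
  have hitems : (PySem.Dict.counter arr).items
      = (PySem.Set.ofList arr).map (fun k => (k, (arr.count k : Int))) :=
    PySem.Dict.items_counter arr
  simp only [PySem.Dict.values, hitems, List.map_map]
  rfl

theorem pvVs_mem (arr : List Int) :
    ∀ v ∈ (PySem.Dict.counter arr).values, 1 ≤ v ∧ v ≤ (arr.length : Int) := by
  intro v hv
  rw [pvVs_eq] at hv
  obtain ⟨k, hk, rfl⟩ := List.mem_map.mp hv
  have hkarr : k ∈ arr := (PySem.Set.mem_ofList _ _).mp hk
  constructor
  · exact_mod_cast List.count_pos_iff.mpr hkarr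
  · exact_mod_cast List.count_le_length

theorem pvRange_desc (n : Int) : (PySem.List.pyRange n 0 (-1)).Pairwise (fun a b => b < a) := by
  rw [PySem.List.pyRange_neg_one_eq_reverse, List.pairwise_reverse]
  exact (PySem.List.pairwise_lt_pyRange_one 1 (n + 1)).imp (fun h => h)

theorem pvRange_nodup (n : Int) : (PySem.List.pyRange n 0 (-1)).Nodup :=
  (pvRange_desc n).imp (fun h => by omega)

theorem pvExp_perm (n : Int) (vs : List Int) (hv : ∀ v ∈ vs, 1 ≤ v ∧ v ≤ n) :
    ((PySem.List.pyRange n 0 (-1)).flatMap (fun f => List.replicate (vs.count f) f)).Perm vs := by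
  refine List.perm_iff_count.mpr (fun g => ?_)
  rw [pvCount_flatMap (fun f => vs.count f) _ (pvRange_nodup n) g]
  by_cases hg : g ∈ vs
  · rw [if_pos ((PySem.List.mem_pyRange_neg_one).mpr ⟨by have := hv g hg; omega, (hv g hg).2⟩)]
  · rw [List.count_eq_zero.mpr hg]
    split <;> rfl

theorem pvSorted_eq_exp (n : Int) (vs : List Int) (hv : ∀ v ∈ vs, 1 ≤ v ∧ v ≤ n) :
    PySem.List.sorted vs (fun x => x) true
      = (PySem.List.pyRange n 0 (-1)).flatMap (fun f => List.replicate (vs.count f) f) := by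
  apply PySem.List.eq_of_perm_of_pairwise_le_of_injective (key := fun x : Int => -x) neg_injective
  · exact (PySem.List.sorted_perm vs (fun x => x) true).trans (pvExp_perm n vs hv).symm
  · exact (PySem.List.sorted_pairwise_rev vs (fun x => x)).imp (fun h => by omega)
  · exact (pvPairwise_flatMap (fun f => vs.count f) _ (pvRange_desc n)).imp (fun h => by omega)

-- ===== VERDICT (by name: the statement is the Claim_ definition above) =====
theorem minSetSize_counter_and_sort_spec : Claim_equal_minSetSize_counter_and_sort := by
  unfold Claim_equal_minSetSize_counter_and_sort Spec_minSetSize_counter_and_sort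
  intro arr _
  by_cases hnil : arr = []
  · subst hnil; rfl
  have hn1 : 1 ≤ arr.length := List.length_pos_iff.mpr hnil
  set n := arr.length with hn
  set vs := (PySem.Dict.counter arr).values with hvs
  have hv : ∀ v ∈ vs, 1 ≤ v ∧ v ≤ (n : Int) := pvVs_mem arr
  have hvne : vs ≠ [] := by
    intro h
    rw [hvs, pvVs_eq] at h
    have h' : PySem.Set.ofList arr = [] := List.map_eq_nil_iff.mp h
    have hk : arr.head hnil ∈ PySem.Set.ofList arr :=
      (PySem.Set.mem_ofList _ _).mpr (List.head_mem hnil)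
    rw [h'] at hk; exact absurd hk (by simp)
  -- the expansion list
  set exp := (PySem.List.pyRange (n : Int) 0 (-1)).flatMap
      (fun f => List.replicate (vs.count f) f) with hexp
  have hperm : exp.Perm vs := pvExp_perm (n : Int) vs hv
  have hexpne : exp ≠ [] := by
    intro h
    have hlen := hperm.length_eq
    rw [h] at hlen
    exact hvne (List.length_eq_zero_iff.mp (by simpa using hlen.symm))
  have hexppos : ∀ v ∈ exp, 1 ≤ v := fun v hvm => (hv v (hperm.mem_iff.mp hvm)).1
  -- A side
  have hA : minSetSize_counter_and_sort arr
      = pvS exp (PySem.Int.floordiv (n : Int) 2) := by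
    simp only [minSetSize_counter_and_sort]
    rw [pvGoA_eq_S, ← hvs, ← hn, pvSorted_eq_exp (n : Int) vs hv, ← hexp]
    ring
  -- B side
  have hfreq : arr.foldl (fun d x => d.insert x (d.getD x 0 + 1)) PySem.Dict.empty
      = PySem.Dict.counter arr := PySem.Dict.foldl_insert_getD_add_one_eq_counter arr
  have hbucket : ∀ f : Int, 0 ≤ f → f < (n : Int) + 1 →
      PySem.List.pyGetD
        (vs.foldl (fun b f => b.set f.toNat (PySem.List.pyGetD b f 0 + 1))
          (List.replicate (n + 1) (0 : Int))) f 0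
        = (vs.count f : Int) := by
    intro f h0 h1
    rw [pvBucket_get n vs hv _ (List.length_replicate) f h0 h1]
    rw [PySem.List.pyGetD_eq_getElem _ 0 h0 (by simp; omega)]
    simp
  have hB : minSetSize_counter_and_sort_alt arr
      = pvS exp (max (PySem.Int.floordiv (n : Int) 2) 1) := by
    simp only [minSetSize_counter_and_sort_alt, ← hn]
    rw [if_neg (by omega), hfreq, ← hvs]
    rw [pvGoB_eq_S _ (fun f => vs.count f) _
      (fun f hf => by
        have hmem := (PySem.List.mem_pyRange_neg_one).mp hf
        exact ⟨by omega, hbucket f (by omega) (by omega)⟩)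
      0 _ (le_max_right _ 1)]
    rw [← hexp]; ring
  -- glue: the two budgets agree
  have hhalf0 : 0 ≤ PySem.Int.floordiv (n : Int) 2 := by
    rw [PySem.Int.floordiv_eq_ediv_of_pos (by omega)]
    exact Int.ediv_nonneg (by omega) (by omega)
  rw [hA, hB]
  by_cases hh : 1 ≤ PySem.Int.floordiv (n : Int) 2
  · rw [max_eq_left hh]
  · rw [pvS_one exp _ hexpne hexppos (by omega),
        pvS_one exp _ hexpne hexppos (by omega)]
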